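-- pv_equiv track=rewrite | github.com/maxence-fasst/aoc2023 | day9/day9.py | _get_repetitive_elements
-- ===== SOURCE A (Python) =====
-- def _get_repetitive_elements(elements):
--     shortest = []
--     if len(elements) <= 1:
--         return elements
--     if len(set(elements)) == len(elements):
--         return elements
--     for x in range(len(elements)):
--         if elements[0:x] == elements[x:2 * x]:
--             shortest = elements[0:x]
--     return shortest
-- ===== SOURCE B (Python) =====
-- def _get_repetitive_elements(elements):
--     n = len(elements)
--     if n <= 1:
--         return elements
--     if len(set(elements)) == n:
--         return elements
--     # Z-algorithm: z[i] = length of longest common prefix of elements and elements[i:]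
--     z = [0] * n
--     l = 0
--     r = 0
--     for i in range(1, n):
--         k = 0
--         if i < r:
--             k = min(r - i, z[i - l])
--         while i + k < n and elements[k] == elements[i + k]:
--             k += 1
--         z[i] = k
--         if i + k > r:
--             l = i
--             r = i + k
--     best = 0
--     for i in range(1, n):
--         if z[i] >= i:
--             best = i
--     return elements[:best]
-- ===== Notes on version B (the rewrite author's own statement) =====
-- stated objective: faster
-- what changed: Replaces the quadratic scan that builds and compares two slices for every offset x with a single linear Z-algorithm pass (z[i] = longest common prefix of the list and its suffix at i); the repeated prefix of length x exists iff z[x] >= x, so one more linear scan picks the largest such x.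
import Mathlib
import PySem

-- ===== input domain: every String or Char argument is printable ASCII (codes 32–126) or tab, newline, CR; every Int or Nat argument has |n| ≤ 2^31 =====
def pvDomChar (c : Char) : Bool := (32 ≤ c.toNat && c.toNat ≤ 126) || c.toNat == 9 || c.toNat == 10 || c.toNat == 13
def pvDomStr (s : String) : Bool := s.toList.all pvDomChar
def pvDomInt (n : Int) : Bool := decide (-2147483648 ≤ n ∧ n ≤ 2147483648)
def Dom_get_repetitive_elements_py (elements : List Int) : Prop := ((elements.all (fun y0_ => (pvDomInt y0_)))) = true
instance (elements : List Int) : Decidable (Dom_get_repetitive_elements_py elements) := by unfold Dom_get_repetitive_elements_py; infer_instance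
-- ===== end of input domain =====

-- B replaces A's quadratic slice-and-compare scan with a linear Z-algorithm pass; objective: faster (asymptotic).

-- ===== PORT A =====
def get_repetitive_elements_py (elements : List Int) : List Int :=
  let shortest : List Int := []
  if elements.length ≤ 1 then elements
  else if (PySem.Set.ofList elements).length = elements.length then elements
  else
    (PySem.List.pyRange 0 (elements.length : Int) 1).foldl
      (fun shortest x =>
        if PySem.List.slice elements (some 0) (some x) =
           PySem.List.slice elements (some x) (some (2 * x))
        then PySem.List.slice elements (some 0) (some x)
        else shortest)
      shortest

-- ===== PORT B =====
-- the `while i + k < n and elements[k] == elements[i + k]: k += 1` loop of Source B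
def zExtend (s : List Int) (i : Nat) (k : Nat) : Nat :=
  if h : i + k < s.length ∧ s.getD k 0 = s.getD (i + k) 0 then zExtend s i (k + 1) else k
termination_by s.length - (i + k)
decreasing_by omega

-- the `for i in range(1, n)` loop of Source B; Python pre-allocates z = [0]*n and assigns
-- z[i] = k in index order, which we transcribe as appending k (same value at every index read).
def zLoop (s : List Int) (i l r : Nat) (z : List Nat) : List Nat :=
  if h : i < s.length then
    let k0 := if i < r then min (r - i) (z.getD (i - l) 0) else 0
    let k := zExtend s i k0
    let z' := z ++ [k]
    if i + k > r then zLoop s (i + 1) i (i + k) z' else zLoop s (i + 1) l r z'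
  else z
termination_by s.length - i
decreasing_by all_goals omega

def get_repetitive_elements_py_alt (elements : List Int) : List Int :=
  let n := elements.length
  if n ≤ 1 then elements
  else if (PySem.Set.ofList elements).length = n then elements
  else
    let z := zLoop elements 1 0 0 [0]
    let best := (List.range' 1 (n - 1)).foldl (fun best i => if z.getD i 0 ≥ i then i else best) 0
    elements.take best

-- ===== PRECONDITION & SPEC =====
def Spec_get_repetitive_elements_py (elements : List Int) (out : List Int) : Prop := out = get_repetitive_elements_py_alt elements
instance (elements : List Int) (out : List Int) : Decidable (Spec_get_repetitive_elements_py elements out) := by unfold Spec_get_repetitive_elements_py; infer_instance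

-- ===== CLAIM (what is proved, stated in full; the proofs are below) =====
def Claim_equal_get_repetitive_elements_py : Prop := ∀ (elements : List Int), Dom_get_repetitive_elements_py elements → Spec_get_repetitive_elements_py elements (get_repetitive_elements_py elements)

-- ===== LEMMAS AND PROOFS =====

-- longest common prefix of two lists
def pvLcp : List Int → List Int → Nat
  | a :: as, b :: bs => if a = b then pvLcp as bs + 1 else 0
  | _, _ => 0

lemma pvLcp_le_left : ∀ a b : List Int, pvLcp a b ≤ a.length := by
  intro a
  induction a with
  | nil => intro b; cases b <;> simp [pvLcp]
  | cons x as ih =>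
    intro b
    cases b with
    | nil => simp [pvLcp]
    | cons y bs =>
      simp only [pvLcp, List.length_cons]
      split <;> [exact Nat.succ_le_succ (ih bs); omega]

lemma pvLcp_le_right : ∀ a b : List Int, pvLcp a b ≤ b.length := by
  intro a
  induction a with
  | nil => intro b; cases b <;> simp [pvLcp]
  | cons x as ih =>
    intro b
    cases b with
    | nil => simp [pvLcp]
    | cons y bs =>
      simp only [pvLcp, List.length_cons]
      split <;> [exact Nat.succ_le_succ (ih bs); omega]

lemma take_pvLcp : ∀ a b : List Int, a.take (pvLcp a b) = b.take (pvLcp a b) := by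
  intro a
  induction a with
  | nil => intro b; cases b <;> simp [pvLcp]
  | cons x as ih =>
    intro b
    cases b with
    | nil => simp [pvLcp]
    | cons y bs =>
      by_cases hxy : x = y
      · simp [pvLcp, hxy, ih bs]
      · simp [pvLcp, hxy]

lemma take_eq_of_le_pvLcp (a b : List Int) (k : Nat) (h : k ≤ pvLcp a b) :
    a.take k = b.take k := by
  have := take_pvLcp a b
  calc a.take k = (a.take (pvLcp a b)).take k := by rw [List.take_take, Nat.min_eq_left h]
    _ = (b.take (pvLcp a b)).take k := by rw [this]
    _ = b.take k := by rw [List.take_take, Nat.min_eq_left h]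

lemma le_pvLcp_of_take_eq : ∀ (a b : List Int) (k : Nat), k ≤ a.length → a.take k = b.take k → k ≤ pvLcp a b := by
  intro a
  induction a with
  | nil =>
    intro b k hk _
    have : k = 0 := by simpa using hk
    simp [this]
  | cons x as ih =>
    intro b k hk ht
    cases k with
    | zero => omega
    | succ m =>
      cases b with
      | nil => simp at ht
      | cons y bs =>
        simp only [List.take_succ_cons, List.cons.injEq] at ht
        obtain ⟨hxy, hts⟩ := ht
        subst hxy
        simp [pvLcp]
        have := ih bs m (by simpa using hk) hts
        omega

lemma getD_ne_at_pvLcp : ∀ (a b : List Int), pvLcp a b < a.length → pvLcp a b < b.length →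
    a.getD (pvLcp a b) 0 ≠ b.getD (pvLcp a b) 0 := by
  intro a
  induction a with
  | nil => intro b h; simp at h
  | cons x as ih =>
    intro b ha hb
    cases b with
    | nil => simp at hb
    | cons y bs =>
      by_cases hxy : x = y
      · subst hxy
        simp [pvLcp] at ha hb ⊢
        exact ih bs ha hb
      · simp [pvLcp, hxy]

lemma getD_eq_of_lt_pvLcp : ∀ (a b : List Int) (k : Nat), k < pvLcp a b →
    a.getD k 0 = b.getD k 0 := by
  intro a
  induction a with
  | nil => intro b k h; cases b <;> simp [pvLcp] at h
  | cons x as ih =>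
    intro b k h
    cases b with
    | nil => simp [pvLcp] at h
    | cons y bs =>
      by_cases hxy : x = y
      · subst hxy
        simp [pvLcp] at h
        cases k with
        | zero => simp
        | succ m => simpa using ih bs m (by omega)
      · simp [pvLcp, hxy] at h

lemma take_drop_eq_of_take_eq (u v : List Int) (a j k : Nat)
    (h : u.take a = v.take a) (hjk : j + k ≤ a) :
    (u.drop j).take k = (v.drop j).take k := by
  have h1 : ∀ w : List Int, (w.drop j).take k = (w.take (j + k)).drop j := by
    intro w
    rw [List.drop_take]
    congr 1
    omega
  have h2 : u.take (j + k) = v.take (j + k) := by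
    calc u.take (j + k) = (u.take a).take (j + k) := by rw [List.take_take, Nat.min_eq_left hjk]
      _ = (v.take a).take (j + k) := by rw [h]
      _ = v.take (j + k) := by rw [List.take_take, Nat.min_eq_left hjk]
  rw [h1 u, h1 v, h2]

lemma pvLcp_shift (s : List Int) (l j k : Nat)
    (h1 : j + k ≤ pvLcp s (s.drop l)) (h2 : k ≤ pvLcp s (s.drop j)) :
    k ≤ pvLcp s (s.drop (l + j)) := by
  have box := take_pvLcp s (s.drop l)
  have e1 : (s.drop j).take k = ((s.drop l).drop j).take k :=
    take_drop_eq_of_take_eq _ _ _ j k box h1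
  rw [List.drop_drop] at e1
  have e2 : s.take k = (s.drop j).take k := take_eq_of_le_pvLcp _ _ _ h2
  apply le_pvLcp_of_take_eq
  · exact le_trans h2 (pvLcp_le_left _ _)
  · rw [e2, e1, Nat.add_comm l j]

lemma zExtend_eq (s : List Int) (i k : Nat) (hk : k ≤ pvLcp s (s.drop i)) :
    zExtend s i k = pvLcp s (s.drop i) := by
  have hLlen : pvLcp s (s.drop i) ≤ s.length - i := by
    have := pvLcp_le_right s (s.drop i)
    simpa using this
  unfold zExtend
  split
  case isTrue h =>
    have hlt : k < pvLcp s (s.drop i) := by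
      rcases Nat.lt_or_ge k (pvLcp s (s.drop i)) with hlt | hge
      · exact hlt
      · exfalso
        have hkL : k = pvLcp s (s.drop i) := le_antisymm hk hge
        have hne := getD_ne_at_pvLcp s (s.drop i) (by omega)
          (by rw [List.length_drop]; omega)
        apply hne
        rw [← hkL]
        rw [List.getD_eq_getElem?_getD, List.getD_eq_getElem?_getD, List.getElem?_drop]
        rw [List.getD_eq_getElem?_getD, List.getD_eq_getElem?_getD] at h
        exact h.2
    exact zExtend_eq s i (k + 1) hlt
  case isFalse h =>
    rcases Nat.lt_or_ge k (pvLcp s (s.drop i)) with hlt | hge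
    · exfalso
      apply h
      constructor
      · omega
      · have := getD_eq_of_lt_pvLcp s (s.drop i) k hlt
        rw [List.getD_eq_getElem?_getD, List.getD_eq_getElem?_getD, List.getElem?_drop] at this
        rw [List.getD_eq_getElem?_getD, List.getD_eq_getElem?_getD]
        exact this
    · omega
termination_by pvLcp s (s.drop i) - k

lemma getD_snoc (z : List Nat) (k j : Nat) :
    (z ++ [k]).getD j 0 = if j < z.length then z.getD j 0 else if j = z.length then k else 0 := by
  rcases Nat.lt_trichotomy j z.length with h | h | h
  · rw [if_pos h]
    rw [List.getD_eq_getElem?_getD, List.getD_eq_getElem?_getD, List.getElem?_append_left h]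
  · rw [if_neg (by omega), if_pos h, h]
    simp
  · rw [if_neg (by omega), if_neg (by omega)]
    rw [List.getD_eq_getElem?_getD, List.getElem?_eq_none (by simp; omega)]
    rfl

lemma zLoop_spec (s : List Int) (i l r : Nat) (z : List Nat)
    (hzl : z.length = i) (hi1 : 1 ≤ i)
    (hub : ∀ j, z.getD j 0 ≤ pvLcp s (s.drop j))
    (hex : ∀ j, 1 ≤ j → j < i → z.getD j 0 = pvLcp s (s.drop j))
    (hli : l < i) (hr : r ≤ l + pvLcp s (s.drop l)) :
    ∀ j, 1 ≤ j → j < s.length → (zLoop s i l r z).getD j 0 = pvLcp s (s.drop j) := by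
  unfold zLoop
  split
  case isTrue hilen =>
    set k0 := if i < r then min (r - i) (z.getD (i - l) 0) else 0 with hk0def
    have hk0 : k0 ≤ pvLcp s (s.drop i) := by
      rw [hk0def]
      split
      case isTrue hir =>
        have h2 : min (r - i) (z.getD (i - l) 0) ≤ pvLcp s (s.drop (i - l)) :=
          le_trans (Nat.min_le_right _ _) (hub (i - l))
        have h1 : (i - l) + min (r - i) (z.getD (i - l) 0) ≤ pvLcp s (s.drop l) := by
          have := Nat.min_le_left (r - i) (z.getD (i - l) 0)
          omega
        have := pvLcp_shift s l (i - l) (min (r - i) (z.getD (i - l) 0)) h1 h2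
        rwa [Nat.add_sub_cancel' (le_of_lt hli)] at this
      case isFalse => exact Nat.zero_le _
    have hkeq := zExtend_eq s i k0 hk0
    set k := zExtend s i k0 with hkdef
    have hub' : ∀ j, (z ++ [k]).getD j 0 ≤ pvLcp s (s.drop j) := by
      intro j
      rw [getD_snoc]
      split
      case isTrue => exact hub j
      case isFalse hge =>
        split
        case isTrue hj =>
          have hji : j = i := by omega
          rw [hkeq, hji]
        case isFalse => exact Nat.zero_le _
    have hex' : ∀ j, 1 ≤ j → j < i + 1 → (z ++ [k]).getD j 0 = pvLcp s (s.drop j) := by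
      intro j hj1 hj2
      rw [getD_snoc]
      by_cases hlt : j < z.length
      · rw [if_pos hlt]
        exact hex j hj1 (by omega)
      · have hji : j = i := by omega
        rw [if_neg hlt, if_pos (by omega), hkeq, hji]
    have hlen' : (z ++ [k]).length = i + 1 := by simp [hzl]
    dsimp only
    rw [← hkdef]
    split
    case isTrue hgt =>
      exact zLoop_spec s (i + 1) i (i + k) (z ++ [k]) hlen' (by omega) hub' hex'
        (by omega) (by rw [hkeq])
    case isFalse hle =>
      exact zLoop_spec s (i + 1) l r (z ++ [k]) hlen' (by omega) hub' hex'
        (by omega) hr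
  case isFalse hilen =>
    intro j hj1 hj2
    exact hex j hj1 (by omega)
termination_by s.length - i

lemma cond_iff (s : List Int) (x : Nat) (hx : x ≤ s.length) :
    (s.take x = (s.drop x).take x) ↔ x ≤ pvLcp s (s.drop x) :=
  ⟨fun h => le_pvLcp_of_take_eq _ _ _ hx h, fun h => take_eq_of_le_pvLcp _ _ _ h⟩

lemma fold_take (s : List Int) (Z : List Nat) :
    ∀ (xs : List Nat), (∀ x ∈ xs, ((s.take x = (s.drop x).take x) ↔ Z.getD x 0 ≥ x)) →
    ∀ b0 : Nat,
      xs.foldl (fun sh x => if s.take x = (s.drop x).take x then s.take x else sh) (s.take b0)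
      = s.take (xs.foldl (fun b i => if Z.getD i 0 ≥ i then i else b) b0)
  | [], _, _ => rfl
  | x :: xs, h, b0 => by
    simp only [List.foldl_cons]
    by_cases hc : s.take x = (s.drop x).take x
    · rw [if_pos hc, if_pos ((h x (by simp)).1 hc)]
      exact fold_take s Z xs (fun y hy => h y (by simp [hy])) x
    · rw [if_neg hc, if_neg (fun hle => hc ((h x (by simp)).2 hle))]
      exact fold_take s Z xs (fun y hy => h y (by simp [hy])) b0

-- ===== VERDICT (by name: the statement is the Claim_ definition above) =====
theorem get_repetitive_elements_py_spec : Claim_equal_get_repetitive_elements_py := by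
  unfold Claim_equal_get_repetitive_elements_py Spec_get_repetitive_elements_py
  intro es _
  unfold get_repetitive_elements_py get_repetitive_elements_py_alt
  by_cases h1 : es.length ≤ 1
  · simp only [if_pos h1]
  by_cases h2 : (PySem.Set.ofList es).length = es.length
  · simp only [if_neg h1, if_pos h2]
  simp only [if_neg h1, if_neg h2]
  set Z := zLoop es 1 0 0 [0] with hZdef
  have hZ : ∀ j, 1 ≤ j → j < es.length → Z.getD j 0 = pvLcp es (es.drop j) := by
    rw [hZdef]
    exact zLoop_spec es 1 0 0 [0] rfl (le_refl 1)
      (fun j => by rw [show ([0] : List Nat).getD j 0 = 0 by cases j <;> rfl]; exact Nat.zero_le _)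
      (fun j hj1 hj2 => absurd hj2 (by omega))
      (by omega) (Nat.zero_le _)
  rw [PySem.List.pyRange_one]
  rw [show ((es.length : Int) - 0).toNat = es.length by simp]
  rw [List.foldl_map]
  have hfun : (fun (shortest : List Int) (k : Nat) =>
        if PySem.List.slice es (some 0) (some (0 + (k : Int))) =
           PySem.List.slice es (some (0 + (k : Int))) (some (2 * (0 + (k : Int))))
        then PySem.List.slice es (some 0) (some (0 + (k : Int)))
        else shortest)
      = (fun (sh : List Int) (x : Nat) =>
        if es.take x = (es.drop x).take x then es.take x else sh) := by
    funext sh k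
    simp only [zero_add, two_mul, PySem.List.slice_zero_start,
      PySem.List.slice_to_natCast, PySem.List.slice_natCast_add]
  rw [hfun]
  have hiff : ∀ x ∈ List.range es.length,
      ((es.take x = (es.drop x).take x) ↔ Z.getD x 0 ≥ x) := by
    intro x hx
    rw [List.mem_range] at hx
    by_cases hx1 : 1 ≤ x
    · rw [ge_iff_le, hZ x hx1 hx]
      exact cond_iff es x (le_of_lt hx)
    · have : x = 0 := by omega
      subst this
      exact iff_of_true (by simp) (Nat.zero_le _)
  rw [show ([] : List Int) = es.take 0 from (List.take_zero (l := es)).symm]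
  rw [fold_take es Z (List.range es.length) hiff 0]
  congr 1
  obtain ⟨m, hm⟩ : ∃ m, es.length = m + 1 := ⟨es.length - 1, by omega⟩
  rw [hm, List.range_eq_range', List.range'_succ, List.foldl_cons]
  rw [if_pos (Nat.zero_le _)]
  rfl
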